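-- pv_equiv track=rewrite | github.com/DM-09/PythonCode | Baekjoon/빠른 replace.py | frep
-- ===== SOURCE A (Python) =====
-- def frep(s : str, f : str, rep : str = ''):
--     st, f, lf = [], list(f), len(f)
--     for i in s:
--         st.append(i)
--         if st[-lf:] == f:
--             for _ in range(lf): st.pop()
--             st.append(rep)
--     return ''.join(st)
-- ===== SOURCE B (Python) =====
-- def frep(s: str, f: str, rep: str = ''):
--     # Active-match-length automaton: each stack entry stores, alongside its
--     # token, the list K of all k such that the last k tokens equal f[:k].
--     # A new token's K comes incrementally from the K below it, so the stack
--     # is never re-sliced or rescanned; a full match is just lf in K.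
--     lf = len(f)
--     if lf == 0:
--         return s
--
--     def step(K, tok):
--         # match lengths after pushing token tok on a stack whose lengths are K
--         return ([1] if tok == f[0] else []) + [k + 1 for k in K if k < lf and tok == f[k]]
--
--     stack = []  # entries (token, K); top is the end
--     for ch in s:
--         K = step(stack[-1][1] if stack else [], ch)
--         if lf in K:
--             del stack[len(stack) - (lf - 1):]
--             below = stack[-1][1] if stack else []
--             stack.append((rep, step(below, rep)))
--         else:
--             stack.append((ch, K))
--     return ''.join(t for t, _ in stack)
-- ===== Notes on version B (the rewrite author's own statement) =====
-- stated objective: alternative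
-- what changed: Instead of re-slicing the stack and comparing the last lf tokens to f after every push, B maintains with each stack entry the set of active match lengths (all k with the last k tokens equal to f[:k]), updated incrementally from the entry below, so a full match is just a membership test lf in K and the stack is never rescanned.
import Mathlib
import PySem

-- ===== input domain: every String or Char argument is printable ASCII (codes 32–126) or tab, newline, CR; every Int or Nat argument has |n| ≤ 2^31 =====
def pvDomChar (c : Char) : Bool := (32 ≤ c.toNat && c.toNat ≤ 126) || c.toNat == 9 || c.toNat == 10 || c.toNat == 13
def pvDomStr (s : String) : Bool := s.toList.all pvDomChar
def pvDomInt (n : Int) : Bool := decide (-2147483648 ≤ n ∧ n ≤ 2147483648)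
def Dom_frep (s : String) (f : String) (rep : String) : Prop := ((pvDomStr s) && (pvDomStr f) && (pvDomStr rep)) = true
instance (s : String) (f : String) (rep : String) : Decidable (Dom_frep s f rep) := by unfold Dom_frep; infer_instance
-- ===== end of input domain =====

-- B replaces A's per-character stack re-slicing (st[-lf:] == f, then lf pops) by an
-- active-match-length automaton: each stack entry carries the list of all k with
-- "last k tokens = f[:k]", updated incrementally from the entry below, so a match
-- is a membership test and the stack is never rescanned (objective: alternative).

-- ===== PORT A =====
-- A's stack holds Python strings (single chars and pushed `rep`); a token is a List Char.
def frepStepA (fl : List (List Char)) (lf : Nat) (rl : List Char)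
    (st : List (List Char)) (c : Char) : List (List Char) :=
  let st' := st ++ [[c]]                                          -- st.append(i)
  if PySem.List.slice st' (some (-(lf : Int))) none = fl then     -- st[-lf:] == f
    ((PySem.List.pyRange 0 lf 1).foldl (fun acc _ => acc.dropLast) st')  -- for _ in range(lf): st.pop()
      ++ [rl]                                                     -- st.append(rep)
  else st'

def frep (s : String) (f : String) (rep : String) : String :=
  -- f = list(f); lf = len(f) (passed straight to the loop body); ''.join(st) at the end
  String.ofList ((s.toList.foldl
    (frepStepA (f.toList.map (fun c => [c])) f.toList.length rep.toList) []).flatten)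

-- ===== PORT B =====
-- step(K, tok): the active match lengths after pushing token tok on a stack whose lengths are K
def frepStepK (fl : List Char) (lf : Nat) (K : List Nat) (tok : List Char) : List Nat :=
  (if tok = [fl.getD 0 ' '] then [1] else [])
    ++ K.filterMap (fun k => if k < lf ∧ tok = [fl.getD k ' '] then some (k + 1) else none)

-- stack[-1][1] if stack else []
def frepTopK (stack : List (List Char × List Nat)) : List Nat :=
  (stack.getLast?).elim [] Prod.snd

def frepStepB (fl : List Char) (lf : Nat) (rl : List Char)
    (stack : List (List Char × List Nat)) (c : Char) : List (List Char × List Nat) :=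
  let K := frepStepK fl lf (frepTopK stack) [c]
  if lf ∈ K then
    let stack' := stack.take (stack.length - (lf - 1))            -- del stack[len(stack)-(lf-1):]
    stack' ++ [(rl, frepStepK fl lf (frepTopK stack') rl)]        -- stack.append((rep, step(below, rep)))
  else stack ++ [([c], K)]                                        -- stack.append((ch, K))

def frep_alt (s : String) (f : String) (rep : String) : String :=
  if f.toList.length = 0 then s                                   -- if lf == 0: return s
  else
    String.ofList (((s.toList.foldl
      (frepStepB f.toList f.toList.length rep.toList) []).map Prod.fst).flatten)

-- ===== PRECONDITION & SPEC =====
def Spec_frep (s : String) (f : String) (rep : String) (out : String) : Prop := out = frep_alt s f rep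
instance (s : String) (f : String) (rep : String) (out : String) : Decidable (Spec_frep s f rep out) := by unfold Spec_frep; infer_instance

-- ===== CLAIM (what is proved, stated in full; the proofs are below) =====
def Claim_equal_frep : Prop := ∀ (s : String) (f : String) (rep : String), Dom_frep s f rep → Spec_frep s f rep (frep s f rep)

-- ===== LEMMAS AND PROOFS =====

-- "the last k stack tokens are exactly f[:k]" (as single-char tokens)
def KMatch (fl : List Char) (ts : List (List Char)) (k : Nat) : Prop :=
  1 ≤ k ∧ k ≤ fl.length ∧ (fl.take k).map (fun c => [c]) <:+ ts

lemma suffix_concat_concat {α : Type} (a b : List α) (x y : α) :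
    (a ++ [x]) <:+ (b ++ [y]) ↔ x = y ∧ a <:+ b := by
  rw [← List.reverse_prefix]
  simp [List.cons_prefix_cons]

lemma frep_pop (lf : Nat) : ∀ l : List (List Char),
    (PySem.List.pyRange 0 lf 1).foldl (fun acc _ => acc.dropLast) l = l.take (l.length - lf) := by
  induction lf with
  | zero => intro l; simp
  | succ n ih =>
    intro l
    have h : ((0 : Int)) ≤ (n : Int) := by positivity
    have hsplit : PySem.List.pyRange 0 (n + 1 : Nat) 1
        = PySem.List.pyRange 0 (n : Int) 1 ++ [(n : Int)] := by
      have := PySem.List.pyRange_one_succ_right (a := 0) (b := (n : Int)) h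
      simpa using this
    rw [hsplit, List.foldl_append, ih]
    simp only [List.foldl_cons, List.foldl_nil, List.dropLast_eq_take, List.take_take,
      List.length_take]
    congr 1
    omega

lemma mem_stepK (fl : List Char) (K : List Nat) (t : List Char) (k' : Nat) :
    k' ∈ frepStepK fl fl.length K t ↔
      ((t = [fl.getD 0 ' '] ∧ k' = 1) ∨
        ∃ k, k ∈ K ∧ k < fl.length ∧ t = [fl.getD k ' '] ∧ k' = k + 1) := by
  simp only [frepStepK, List.mem_append, List.mem_filterMap]
  constructor
  · rintro (h | ⟨k, hk, h⟩)
    · by_cases ht : t = [fl.getD 0 ' ']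
      · rw [if_pos ht] at h; simp at h; exact Or.inl ⟨ht, h⟩
      · rw [if_neg ht] at h; simp at h
    · by_cases hc : k < fl.length ∧ t = [fl.getD k ' ']
      · rw [if_pos hc] at h; simp at h; exact Or.inr ⟨k, hk, hc.1, hc.2, h.symm⟩
      · rw [if_neg hc] at h; simp at h
  · rintro (⟨ht, h1⟩ | ⟨k, hk, hlt, ht, h1⟩)
    · exact Or.inl (by simp [ht, h1])
    · exact Or.inr ⟨k, hk, by simp [hlt, ht, h1]⟩

lemma take_one_eq (fl : List Char) (hfl : fl ≠ []) : fl.take 1 = [fl[0]'(List.length_pos_iff.mpr hfl)] := by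
  cases fl with
  | nil => exact absurd rfl hfl
  | cons a l => simp

lemma step_correct (fl : List Char) (hfl : fl ≠ []) (K : List Nat) (ts : List (List Char))
    (t : List Char) (hK : ∀ k, k ∈ K ↔ KMatch fl ts k) :
    ∀ k', k' ∈ frepStepK fl fl.length K t ↔ KMatch fl (ts ++ [t]) k' := by
  intro k'
  have hlen : 0 < fl.length := List.length_pos_iff.mpr hfl
  have hchar : ∀ m (hm : m < fl.length), fl.getD m ' ' = fl[m]'hm := fun m hm =>
    List.getD_eq_getElem fl ' ' hm
  rw [mem_stepK]
  cases k' with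
  | zero =>
    constructor
    · rintro (⟨-, h⟩ | ⟨k, -, -, -, h⟩) <;> omega
    · rintro ⟨h, -⟩; omega
  | succ j =>
    rcases Nat.eq_zero_or_pos j with hj | hj
    · subst hj
      constructor
      · rintro (⟨ht, -⟩ | ⟨k, hk, -, ht, h1⟩)
        · refine ⟨le_refl _, hlen, ?_⟩
          rw [take_one_eq fl hfl, List.map_singleton]
          exact (suffix_concat_concat [] ts _ t).mpr ⟨by rw [ht, hchar 0 hlen], List.nil_suffix⟩
        · have hk0 : k = 0 := by omega
          subst hk0
          obtain ⟨habs, -, -⟩ := (hK 0).mp hk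
          omega
      · rintro ⟨-, -, hsfx⟩
        rw [take_one_eq fl hfl, List.map_singleton] at hsfx
        have h := (suffix_concat_concat [] ts _ t).mp hsfx
        exact Or.inl ⟨by rw [h.1.symm, hchar 0 hlen], rfl⟩
    · constructor
      · rintro (⟨-, h1⟩ | ⟨k, hk, hklt, ht, h1⟩)
        · omega
        · have hjk : j = k := by omega
          subst hjk
          obtain ⟨-, -, hsfx⟩ := (hK j).mp hk
          refine ⟨by omega, by omega, ?_⟩
          rw [List.take_add_one, List.getElem?_eq_getElem hklt, Option.toList_some,
            List.map_append, List.map_singleton]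
          exact (suffix_concat_concat _ _ _ _).mpr ⟨by rw [ht, hchar j hklt], hsfx⟩
      · rintro ⟨-, hle, hsfx⟩
        have hjlt : j < fl.length := by omega
        rw [List.take_add_one, List.getElem?_eq_getElem hjlt, Option.toList_some,
          List.map_append, List.map_singleton] at hsfx
        obtain ⟨hxy, hs⟩ := (suffix_concat_concat _ _ _ _).mp hsfx
        exact Or.inr ⟨j, (hK j).mpr ⟨hj, by omega, hs⟩, hjlt, by rw [hxy.symm, hchar j hjlt], rfl⟩

-- the invariant: every stored K is the active-length set of the stack up to that entry
def StackInv (fl : List Char) (stB : List (List Char × List Nat)) : Prop :=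
  ∀ i, (h : i < stB.length) → ∀ k,
    k ∈ stB[i].2 ↔ KMatch fl ((stB.map Prod.fst).take (i + 1)) k

lemma top_correct (fl : List Char) (stB : List (List Char × List Nat))
    (hInv : StackInv fl stB) : ∀ k, k ∈ frepTopK stB ↔ KMatch fl (stB.map Prod.fst) k := by
  intro k
  cases stB with
  | nil =>
    simp only [frepTopK, List.getLast?_nil, Option.elim, List.map_nil]
    constructor
    · intro h; simp at h
    · rintro ⟨h1, hle, hsfx⟩
      have h0 := List.suffix_nil.mp hsfx
      have hlen := congrArg List.length h0
      rw [List.length_map, List.length_take, List.length_nil] at hlen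
      omega
  | cons e l =>
    have hlt : l.length < (e :: l).length := by simp
    have hlast : (e :: l).getLast? = some ((e :: l)[l.length]) := by
      rw [List.getLast?_eq_getElem?, List.getElem?_eq_getElem (by simp)]
      simp
    have htop : frepTopK (e :: l) = ((e :: l)[l.length]).2 := by
      simp [frepTopK, hlast]
    rw [htop]
    have := hInv l.length hlt k
    rwa [List.take_of_length_le (by simp)] at this

lemma inv_append (fl : List Char) (stB : List (List Char × List Nat)) (t : List Char)
    (K : List Nat) (hInv : StackInv fl stB)
    (hK : ∀ k, k ∈ K ↔ KMatch fl (stB.map Prod.fst ++ [t]) k) :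
    StackInv fl (stB ++ [(t, K)]) := by
  intro i hi k
  rw [List.length_append, List.length_cons, List.length_nil] at hi
  rcases Nat.lt_or_ge i stB.length with h | h
  · rw [List.getElem_append_left h, List.map_append]
    rw [List.take_append_of_le_length (by simpa using Nat.succ_le_of_lt h)]
    exact hInv i h k
  · have hieq : i = stB.length := by omega
    subst hieq
    rw [List.getElem_append_right (le_refl _)]
    simp only [Nat.sub_self, List.getElem_cons_zero, List.map_append, List.map_cons,
      List.map_nil]
    rw [List.take_of_length_le (by simp)]
    exact hK k

lemma inv_take (fl : List Char) (stB : List (List Char × List Nat)) (m : Nat)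
    (hInv : StackInv fl stB) : StackInv fl (stB.take m) := by
  intro i hi k
  rw [List.length_take] at hi
  have him : i < m := lt_of_lt_of_le hi (min_le_left _ _)
  have hil : i < stB.length := lt_of_lt_of_le hi (min_le_right _ _)
  rw [List.getElem_take, List.map_take, List.take_take, min_eq_left (by omega)]
  exact hInv i hil k

lemma stepAB (fl rl : List Char) (hfl : fl ≠ []) (stB : List (List Char × List Nat))
    (hInv : StackInv fl stB) (c : Char) :
    frepStepA (fl.map (fun c => [c])) fl.length rl (stB.map Prod.fst) c
      = (frepStepB fl fl.length rl stB c).map Prod.fst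
    ∧ StackInv fl (frepStepB fl fl.length rl stB c) := by
  have hlf : 0 < fl.length := List.length_pos_iff.mpr hfl
  set stA := stB.map Prod.fst with hstA
  set st' := stA ++ [[c]] with hst'
  set K' := frepStepK fl fl.length (frepTopK stB) [c] with hK'def
  have hK' : ∀ k, k ∈ K' ↔ KMatch fl st' k :=
    step_correct fl hfl _ stA [c] (top_correct fl stB hInv)
  -- A's slice condition ↔ lf ∈ K'
  have hcond : (PySem.List.slice st' (some (-(fl.length : Int))) none
      = fl.map (fun c => [c])) ↔ fl.length ∈ K' := by
    rw [PySem.List.slice_from_neg_natCast _ _ hlf]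
    rw [hK' fl.length]
    have hsfx : (fl.map (fun c => [c])) <:+ st' ↔
        st'.drop (st'.length - fl.length) = fl.map (fun c => [c]) := by
      rw [List.suffix_iff_eq_drop]
      simp only [List.length_map]
      exact ⟨fun h => h.symm, fun h => h.symm⟩
    constructor
    · intro h
      exact ⟨hlf, le_refl _, by rw [List.take_length]; exact hsfx.mpr h⟩
    · rintro ⟨-, -, h⟩
      rw [List.take_length] at h
      exact hsfx.mp h
  unfold frepStepA frepStepB
  simp only [← hst', ← hK'def]
  by_cases hm : fl.length ∈ K'
  · rw [if_pos (hcond.mpr hm), if_pos hm]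
    set m := stB.length - (fl.length - 1) with hmdef
    have hInv' : StackInv fl (stB.take m) := inv_take fl stB m hInv
    have hKrep := step_correct fl hfl _ ((stB.take m).map Prod.fst) rl
      (top_correct fl (stB.take m) hInv')
    constructor
    · rw [frep_pop]
      have hlen : st'.length = stB.length + 1 := by simp [hst', hstA]
      have htakeA : st'.take (st'.length - fl.length) = stA.take m := by
        rw [hst', hlen]
        have hle : stB.length + 1 - fl.length ≤ stA.length := by
          simp [hstA]; omega
        rw [List.take_append_of_le_length hle]
        congr 1
        omega
      rw [htakeA, List.map_append, List.map_cons, List.map_nil, List.map_take, ← hstA]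
    · exact inv_append fl (stB.take m) rl _ hInv' hKrep
  · rw [if_neg (fun h => hm (hcond.mp h)), if_neg hm]
    constructor
    · simp [hst', hstA]
    · exact inv_append fl stB [c] K' hInv hK'

lemma fold_AB (fl rl : List Char) (hfl : fl ≠ []) :
    ∀ (cs : List Char) (stB : List (List Char × List Nat)), StackInv fl stB →
      cs.foldl (frepStepA (fl.map (fun c => [c])) fl.length rl) (stB.map Prod.fst)
        = (cs.foldl (frepStepB fl fl.length rl) stB).map Prod.fst := by
  intro cs
  induction cs with
  | nil => intro stB _; simp
  | cons c cs ih =>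
    intro stB hInv
    obtain ⟨heq, hInv'⟩ := stepAB fl rl hfl stB hInv c
    simp only [List.foldl_cons, heq]
    exact ih _ hInv'

lemma fold_A_empty (rl : List Char) :
    ∀ (cs : List Char) (st : List (List Char)),
      cs.foldl (frepStepA ([] : List (List Char)) 0 rl) st = st ++ cs.map (fun c => [c]) := by
  intro cs
  induction cs with
  | nil => intro st; simp
  | cons c cs ih =>
    intro st
    simp only [List.foldl_cons, List.map_cons]
    rw [ih]
    have hstep : frepStepA ([] : List (List Char)) 0 rl st c = st ++ [[c]] := by
      simp [frepStepA, PySem.List.slice_none_none]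
    rw [hstep, List.append_assoc]
    rfl

-- ===== VERDICT (by name: the statement is the Claim_ definition above) =====
theorem frep_spec : Claim_equal_frep := by
  intro s f rep _
  unfold Spec_frep frep frep_alt
  by_cases hf : f.toList.length = 0
  · rw [if_pos hf]
    have hfl : f.toList = [] := List.length_eq_zero_iff.mp hf
    rw [hfl]
    simp only [List.map_nil, List.length_nil]
    rw [fold_A_empty rep.toList s.toList []]
    simp only [List.nil_append]
    have hflat : (s.toList.map (fun c => [c])).flatten = s.toList := by
      induction s.toList with
      | nil => rfl
      | cons a l ih => simp [ih]
    rw [hflat]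
    exact String.ofList_toList
  · rw [if_neg hf]
    have hfl : f.toList ≠ [] := fun h => hf (by simp [h])
    have := fold_AB f.toList rep.toList hfl s.toList [] (by intro i hi; simp at hi)
    simp only [List.map_nil] at this
    rw [this]
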